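-- pv_equiv track=rewrite | github.com/rodriguealcazar/google-code-jam | 2020/qualification/vestigium/Solution.py | trace_and_dupes
-- ===== SOURCE A (Python) =====
-- def trace_and_dupes(mat):
--     n = len(mat)
--     mat_trace = 0
--     rows_with_dupes = 0
--     columns_with_dupes = 0
--     cols = {}
--     for i in range(n):
--         row = set()
--         for j in range(n):
--             elem = mat[i][j]
--             if j not in cols:
--                 cols[j] = set()
--             cols[j].add(elem)
--             if i == j:
--                 mat_trace += elem
--             row.add(elem)
--         if len(row) < n:
--             rows_with_dupes += 1
--     for column in cols.values():
--         if len(column) < n: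
--             columns_with_dupes += 1
--
--     return mat_trace, rows_with_dupes, columns_with_dupes
-- ===== SOURCE B (Python) =====
-- def _has_dupe(vals):
--     # sort-then-scan duplicate detection: a duplicate exists iff two equal
--     # values end up adjacent after sorting
--     s = sorted(vals)
--     return any(a == b for a, b in zip(s, s[1:]))
--
--
-- def trace_and_dupes(mat):
--     n = len(mat)
--     trace = sum(mat[i][i] for i in range(n))
--     rows_with_dupes = sum(1 for i in range(n)
--                           if _has_dupe([mat[i][j] for j in range(n)]))
--     columns_with_dupes = sum(1 for j in range(n)
--                              if _has_dupe([mat[i][j] for i in range(n)]))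
--     return trace, rows_with_dupes, columns_with_dupes
-- ===== Notes on version B (the rewrite author's own statement) =====
-- stated objective: alternative
-- what changed: Replaces A's fused nested loop with hash-set based duplicate tracking (a per-row set plus an incrementally built dict of per-column sets) by three independent passes that detect duplicates by sorting each row/column and scanning for an adjacent equal pair; no sets or dicts are used.
import Mathlib
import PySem

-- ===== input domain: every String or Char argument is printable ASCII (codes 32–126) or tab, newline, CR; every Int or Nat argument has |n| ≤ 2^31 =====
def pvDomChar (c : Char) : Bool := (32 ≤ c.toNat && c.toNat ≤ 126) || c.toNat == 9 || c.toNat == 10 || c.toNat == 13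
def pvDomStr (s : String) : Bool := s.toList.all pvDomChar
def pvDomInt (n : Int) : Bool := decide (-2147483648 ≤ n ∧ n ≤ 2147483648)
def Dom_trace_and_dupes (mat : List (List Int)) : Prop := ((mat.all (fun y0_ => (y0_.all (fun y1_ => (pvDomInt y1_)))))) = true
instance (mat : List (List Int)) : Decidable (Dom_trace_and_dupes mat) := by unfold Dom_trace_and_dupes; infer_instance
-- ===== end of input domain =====

-- B replaces A's fused nested loop with hash-set duplicate tracking (per-row set + an
-- incrementally built dict of per-column sets) by three independent passes that detect
-- duplicates by SORTING each row/column and scanning for an adjacent equal pair (objective: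
-- alternative algorithm; no sets or dicts).

-- ===== PORT A =====
-- A-side helpers: 'elem = mat[i][j]' (total under Pre_), and the per-element update of the cols dict
def pvEl (mat : List (List Int)) (i j : Int) : Int :=
  PySem.List.pyGetD (PySem.List.pyGetD mat i []) j 0

-- 'if j not in cols: cols[j] = set()' followed by 'cols[j].add(elem)'
def pvColsStep (cols : PySem.Dict Int (PySem.Set Int)) (j e : Int) :
    PySem.Dict Int (PySem.Set Int) :=
  let cols := if cols.contains j then cols else cols.insert j PySem.Set.empty
  cols.modify j PySem.Set.empty (fun s => s.add e)

-- inner 'for j in range(n)' loop: state (mat_trace, row, cols)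
def pvInnerA (mat : List (List Int)) (i : Int) :
    List Int → Int → PySem.Set Int → PySem.Dict Int (PySem.Set Int) →
    Int × PySem.Set Int × PySem.Dict Int (PySem.Set Int)
  | [], tr, row, cols => (tr, row, cols)
  | j :: js, tr, row, cols =>
    let elem := pvEl mat i j
    let cols' := pvColsStep cols j elem
    let tr' := if i == j then tr + elem else tr
    let row' := row.add elem
    pvInnerA mat i js tr' row' cols'

-- outer 'for i in range(n)' loop: state (mat_trace, rows_with_dupes, cols)
def pvOuterA (mat : List (List Int)) :
    List Int → Int → Int → PySem.Dict Int (PySem.Set Int) →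
    Int × Int × PySem.Dict Int (PySem.Set Int)
  | [], tr, rows, cols => (tr, rows, cols)
  | i :: is, tr, rows, cols =>
    let n := PySem.List.len mat
    let res := pvInnerA mat i (PySem.List.pyRange 0 n 1) tr PySem.Set.empty cols
    let rows' := if PySem.Set.len res.2.1 < n then rows + 1 else rows
    pvOuterA mat is res.1 rows' res.2.2

def trace_and_dupes (mat : List (List Int)) : Int × Int × Int :=
  let n := PySem.List.len mat
  let res := pvOuterA mat (PySem.List.pyRange 0 n 1) 0 0 PySem.Dict.empty
  let columns_with_dupes :=
    res.2.2.values.foldl (fun acc column => if PySem.Set.len column < n then acc + 1 else acc) 0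
  (res.1, res.2.1, columns_with_dupes)

-- ===== PORT B =====
-- B-side helpers: 'mat[i][j]' and '_has_dupe' = sort, then any adjacent equal pair
def pvElB (mat : List (List Int)) (i j : Int) : Int :=
  PySem.List.pyGetD (PySem.List.pyGetD mat i []) j 0

-- _has_dupe: s = sorted(vals); any(a == b for a, b in zip(s, s[1:]))
def pvHasDupe (vals : List Int) : Bool :=
  let s := PySem.List.sorted vals (fun x => x) false
  (s.zip s.tail).any (fun p => p.1 == p.2)

def trace_and_dupes_alt (mat : List (List Int)) : Int × Int × Int :=
  let n := PySem.List.len mat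
  let idx := PySem.List.pyRange 0 n 1
  let trace := (idx.map (fun i => pvElB mat i i)).sum
  let rows_with_dupes : Int :=
    ((idx.filter (fun i => pvHasDupe (idx.map (fun j => pvElB mat i j)))).length : Int)
  let columns_with_dupes : Int :=
    ((idx.filter (fun j => pvHasDupe (idx.map (fun i => pvElB mat i j)))).length : Int)
  (trace, rows_with_dupes, columns_with_dupes)

-- ===== PRECONDITION & SPEC =====
-- Pre_ excludes exactly the inputs on which A raises IndexError: a row shorter than len(mat).
def Pre_trace_and_dupes (mat : List (List Int)) : Prop :=
  ∀ row ∈ mat, mat.length ≤ row.length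
instance (mat : List (List Int)) : Decidable (Pre_trace_and_dupes mat) := by
  unfold Pre_trace_and_dupes; infer_instance
def pvWitness_trace_and_dupes : List (List Int) := [[1, 0], [0, 1]]
def Spec_trace_and_dupes (mat : List (List Int)) (out : Int × Int × Int) : Prop :=
  out = trace_and_dupes_alt mat
instance (mat : List (List Int)) (out : Int × Int × Int) : Decidable (Spec_trace_and_dupes mat out) := by
  unfold Spec_trace_and_dupes; infer_instance

-- ===== CLAIM (what is proved, stated in full; the proofs are below) =====
def Claim_equal_trace_and_dupes : Prop := ∀ (mat : List (List Int)), Dom_trace_and_dupes mat → Pre_trace_and_dupes mat → Spec_trace_and_dupes mat (trace_and_dupes mat)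

-- ===== LEMMAS AND PROOFS =====

lemma pvInnerA_eq (mat : List (List Int)) (i : Int) :
    ∀ (js : List Int) (tr : Int) (row : PySem.Set Int) (cols : PySem.Dict Int (PySem.Set Int)),
    pvInnerA mat i js tr row cols =
      (tr + ((js.filter (fun j => i == j)).map (pvEl mat i)).sum,
       js.foldl (fun s j => s.add (pvEl mat i j)) row,
       js.foldl (fun c j => pvColsStep c j (pvEl mat i j)) cols) := by
  intro js
  induction js with
  | nil => intro tr row cols; simp [pvInnerA]
  | cons j js ih =>
    intro tr row cols
    rw [pvInnerA, ih]
    by_cases h : i = j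
    · simp [h]
      ring_nf
    · simp [(by simpa using h : (i == j) = false)]

lemma getD_pvColsStep (cols : PySem.Dict Int (PySem.Set Int)) (j j' e : Int) :
    (pvColsStep cols j e).getD j' ([] : PySem.Set Int) =
      if j' = j then (cols.getD j ([] : PySem.Set Int)).add e
      else cols.getD j' ([] : PySem.Set Int) := by
  unfold pvColsStep
  by_cases h : cols.contains j
  · simp [h, PySem.Dict.getD_modify]
  · simp only [Bool.not_eq_true] at h
    simp [h, PySem.Dict.getD_modify, PySem.Dict.getD_insert]
    rw [PySem.Dict.getD_of_not_contains cols ([] : PySem.Set Int) h]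
    split_ifs <;> simp [PySem.Set.add]

lemma keys_pvColsStep (cols : PySem.Dict Int (PySem.Set Int)) (j e : Int) :
    (pvColsStep cols j e).keys =
      if cols.contains j then cols.keys else cols.keys ++ [j] := by
  unfold pvColsStep
  by_cases h : cols.contains j
  · simp [h, PySem.Dict.keys_modify, PySem.Dict.keys_insert_of_contains _ _ h]
  · simp only [Bool.not_eq_true] at h
    simp [h, PySem.Dict.keys_modify]
    rw [PySem.Dict.keys_insert_of_contains, PySem.Dict.keys_insert_of_not_contains _ _ h]
    simp

lemma pvColsPass_spec (mat : List (List Int)) (i : Int) :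
    ∀ (js : List Int), js.Nodup →
    ∀ (cols : PySem.Dict Int (PySem.Set Int)), (∀ j ∈ js, j ∈ cols.keys) →
    (js.foldl (fun c j => pvColsStep c j (pvEl mat i j)) cols).keys = cols.keys ∧
    ∀ j' : Int,
      (js.foldl (fun c j => pvColsStep c j (pvEl mat i j)) cols).getD j' ([] : PySem.Set Int) =
        if j' ∈ js then (cols.getD j' ([] : PySem.Set Int)).add (pvEl mat i j')
        else cols.getD j' ([] : PySem.Set Int) := by
  intro js
  induction js with
  | nil => intro _ cols _; simp
  | cons j js ih =>
    intro hnd cols hmem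
    simp only [List.nodup_cons] at hnd
    have hcont : cols.contains j = true :=
      (PySem.Dict.contains_iff_mem_keys cols j).mpr (hmem j (by simp))
    have hkeys : (pvColsStep cols j (pvEl mat i j)).keys = cols.keys := by
      simp [keys_pvColsStep, hcont]
    have hmem' : ∀ j' ∈ js, j' ∈ (pvColsStep cols j (pvEl mat i j)).keys := by
      intro j' hj'; rw [hkeys]; exact hmem j' (by simp [hj'])
    obtain ⟨ihk, ihg⟩ := ih hnd.2 (pvColsStep cols j (pvEl mat i j)) hmem'
    simp only [List.foldl_cons]
    refine ⟨by rw [ihk, hkeys], ?_⟩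
    intro j'
    rw [ihg j']
    by_cases hj : j' ∈ js
    · have : j' ≠ j := fun he => hnd.1 (he ▸ hj)
      simp [hj, getD_pvColsStep, this]
    · simp only [hj, if_false]
      rw [getD_pvColsStep]
      by_cases he : j' = j <;> simp [he, hj]

lemma pvColsPass_fresh (mat : List (List Int)) (i : Int) :
    ∀ (js : List Int), js.Nodup →
    ∀ (cols : PySem.Dict Int (PySem.Set Int)), (∀ j ∈ js, j ∉ cols.keys) →
    (js.foldl (fun c j => pvColsStep c j (pvEl mat i j)) cols).keys = cols.keys ++ js ∧
    ∀ j' : Int,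
      (js.foldl (fun c j => pvColsStep c j (pvEl mat i j)) cols).getD j' ([] : PySem.Set Int) =
        if j' ∈ js then (cols.getD j' ([] : PySem.Set Int)).add (pvEl mat i j')
        else cols.getD j' ([] : PySem.Set Int) := by
  intro js
  induction js with
  | nil => intro _ cols _; simp
  | cons j js ih =>
    intro hnd cols hmem
    simp only [List.nodup_cons] at hnd
    have hcont : cols.contains j = false := by
      rw [← Bool.not_eq_true, PySem.Dict.contains_iff_mem_keys]
      exact hmem j (by simp)
    have hkeys : (pvColsStep cols j (pvEl mat i j)).keys = cols.keys ++ [j] := by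
      simp [keys_pvColsStep, hcont]
    have hmem' : ∀ j' ∈ js, j' ∉ (pvColsStep cols j (pvEl mat i j)).keys := by
      intro j' hj'
      rw [hkeys]
      simp only [List.mem_append, List.mem_singleton]
      rintro (h | h)
      · exact hmem j' (by simp [hj']) h
      · exact hnd.1 (h ▸ hj')
    obtain ⟨ihk, ihg⟩ := ih hnd.2 (pvColsStep cols j (pvEl mat i j)) hmem'
    simp only [List.foldl_cons]
    refine ⟨by rw [ihk, hkeys]; simp, ?_⟩
    intro j'
    rw [ihg j']
    by_cases hj : j' ∈ js
    · have : j' ≠ j := fun he => hnd.1 (he ▸ hj)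
      simp [hj, getD_pvColsStep, this]
    · simp only [hj, if_false]
      rw [getD_pvColsStep]
      by_cases he : j' = j <;> simp [he, hj]

lemma pvColsFold_spec (mat : List (List Int)) (js : List Int) (hnd : js.Nodup) :
    ∀ (is : List Int) (cols : PySem.Dict Int (PySem.Set Int)),
    (∀ j ∈ js, j ∈ cols.keys) →
    (is.foldl (fun c i => js.foldl (fun c j => pvColsStep c j (pvEl mat i j)) c) cols).keys = cols.keys ∧
    ∀ j' ∈ js,
      (is.foldl (fun c i => js.foldl (fun c j => pvColsStep c j (pvEl mat i j)) c) cols).getD j' ([] : PySem.Set Int) =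
        is.foldl (fun s i => PySem.Set.add s (pvEl mat i j')) (cols.getD j' ([] : PySem.Set Int)) := by
  intro is
  induction is with
  | nil => intro cols _; simp
  | cons i is ih =>
    intro cols hmem
    obtain ⟨pk, pg⟩ := pvColsPass_spec mat i js hnd cols hmem
    obtain ⟨ihk, ihg⟩ := ih (js.foldl (fun c j => pvColsStep c j (pvEl mat i j)) cols)
      (fun j hj => pk ▸ hmem j hj)
    simp only [List.foldl_cons]
    refine ⟨by rw [ihk, pk], ?_⟩
    intro j' hj'
    rw [ihg j' hj', pg j']
    simp [hj']

lemma pvOuterA_eq (mat : List (List Int)) :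
    ∀ (is : List Int) (tr rows : Int) (cols : PySem.Dict Int (PySem.Set Int)),
    pvOuterA mat is tr rows cols =
      (tr + (is.map (fun i =>
          (((PySem.List.pyRange 0 (PySem.List.len mat) 1).filter (fun j => i == j)).map (pvEl mat i)).sum)).sum,
       rows + ((is.filter (fun i => decide (PySem.Set.len
          ((PySem.List.pyRange 0 (PySem.List.len mat) 1).foldl
            (fun s j => s.add (pvEl mat i j)) PySem.Set.empty) < PySem.List.len mat))).length : Int),
       is.foldl (fun c i =>
         (PySem.List.pyRange 0 (PySem.List.len mat) 1).foldl
           (fun c j => pvColsStep c j (pvEl mat i j)) c) cols) := by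
  intro is
  induction is with
  | nil => intro tr rows cols; simp [pvOuterA]
  | cons i is ih =>
    intro tr rows cols
    rw [pvOuterA]
    simp only [pvInnerA_eq, ih]
    refine Prod.ext ?_ (Prod.ext ?_ ?_) <;> simp only []
    · simp; ring
    · by_cases h : PySem.Set.len ((PySem.List.pyRange 0 (PySem.List.len mat) 1).foldl
          (fun s j => s.add (pvEl mat i j)) PySem.Set.empty) < PySem.List.len mat
      · rw [if_pos h, List.filter_cons_of_pos (by simpa using h)]
        simp only [List.length_cons]
        push_cast; ring
      · rw [if_neg h, List.filter_cons_of_neg (by simpa using h)]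
    · rfl

lemma pvFilter_beq_singleton : ∀ (l : List Int), l.Nodup → ∀ i ∈ l,
    l.filter (fun j => i == j) = [i] := by
  intro l
  induction l with
  | nil => simp
  | cons a l ih =>
    intro hnd i hi
    simp only [List.nodup_cons] at hnd
    rcases List.mem_cons.mp hi with h | h
    · subst h
      rw [List.filter_cons_of_pos (by simp)]
      have : l.filter (fun j => i == j) = [] := by
        rw [List.filter_eq_nil_iff]
        intro b hb
        simp only [beq_iff_eq]
        exact fun he => hnd.1 (he ▸ hb)
      rw [this]
    · have hne : i ≠ a := fun he => hnd.1 (he ▸ h)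
      rw [List.filter_cons_of_neg (by simpa using hne), ih hnd.2 i h]

lemma pvFoldl_count (N : Int) (l : List (PySem.Set Int)) :
    ∀ a : Int, l.foldl (fun acc column => if PySem.Set.len column < N then acc + 1 else acc) a
      = a + ((l.filter (fun c => decide (PySem.Set.len c < N))).length : Int) := by
  induction l with
  | nil => intro a; simp
  | cons c l ih =>
    intro a
    rw [List.foldl_cons, ih, List.filter_cons]
    by_cases h : PySem.Set.len c < N
    · simp only [h, if_pos, decide_true, List.length_cons]
      push_cast; ring
    · simp only [h, decide_false, Bool.false_eq_true, if_false]

lemma pvCols_final (mat : List (List Int)) (js : List Int) (hnd : js.Nodup)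
    (is : List Int) (hne : is ≠ []) :
    (is.foldl (fun c i => js.foldl (fun c j => pvColsStep c j (pvEl mat i j)) c)
      PySem.Dict.empty).keys = js ∧
    ∀ j' ∈ js,
      (is.foldl (fun c i => js.foldl (fun c j => pvColsStep c j (pvEl mat i j)) c)
        PySem.Dict.empty).getD j' ([] : PySem.Set Int) =
        is.foldl (fun s i => PySem.Set.add s (pvEl mat i j')) [] := by
  cases is with
  | nil => exact absurd rfl hne
  | cons i0 is' =>
    obtain ⟨k1, g1⟩ := pvColsPass_fresh mat i0 js hnd PySem.Dict.empty (by simp)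
    obtain ⟨k2, g2⟩ := pvColsFold_spec mat js hnd is'
      (js.foldl (fun c j => pvColsStep c j (pvEl mat i0 j)) PySem.Dict.empty)
      (by intro j hj; rw [k1]; simpa using hj)
    simp only [List.foldl_cons]
    refine ⟨by rw [k2, k1]; simp, ?_⟩
    intro j' hj'
    rw [g2 j' hj', g1 j']
    simp [hj', PySem.Dict.getD_empty]

-- ===== B-side bridge: sort-and-adjacent-scan detects a duplicate iff |set(l)| < |l| =====

-- adjacent-equal scan on a (≤)-sorted list is exactly non-Nodup
lemma pvAdjAny_sorted : ∀ (s : List Int), s.Pairwise (· ≤ ·) →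
    (((s.zip s.tail).any (fun p => p.1 == p.2)) = true ↔ ¬ s.Nodup) := by
  intro s
  induction s with
  | nil => simp
  | cons a t ih =>
    intro hp
    cases t with
    | nil => simp
    | cons b t' =>
      obtain ⟨hhead, htp⟩ := List.pairwise_cons.mp hp
      by_cases hab : a = b
      · subst hab
        constructor
        · intro _ h
          exact (List.nodup_cons.mp h).1 (by simp)
        · intro _; simp [List.zip]
      · have hrec : ((a :: b :: t').zip (a :: b :: t').tail).any (fun p => p.1 == p.2)
            = (((b :: t').zip (b :: t').tail).any (fun p => p.1 == p.2)) := by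
          simp [List.zip, hab]
        rw [hrec, ih htp]
        have hnotmem : a ∉ b :: t' := by
          intro hmem
          rcases List.mem_cons.mp hmem with h | h
          · exact hab h
          · have h1 : a ≤ b := hhead b (by simp)
            have h2 : b ≤ a := (List.pairwise_cons.mp htp).1 a h
            exact hab (le_antisymm h1 h2)
        constructor
        · intro h hnd
          exact h (List.nodup_cons.mp hnd).2
        · intro h hnd'
          exact h (List.nodup_cons.mpr ⟨hnotmem, hnd'⟩)

-- |set(l)| < |l| iff l has a duplicate
lemma pvSetLen_lt_iff (l : List Int) :
    PySem.Set.len (PySem.Set.ofList l) < (l.length : Int) ↔ ¬ l.Nodup := by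
  have hlen : (PySem.Set.ofList l).length = l.dedup.length := by
    have hperm : (PySem.Set.ofList l).Perm l.dedup := by
      rw [List.perm_ext_iff_of_nodup (PySem.Set.nodup_ofList l) l.nodup_dedup]
      intro a
      rw [PySem.Set.mem_ofList, List.mem_dedup]
    exact hperm.length_eq
  have hlendef : PySem.Set.len (PySem.Set.ofList l) = ((PySem.Set.ofList l).length : Int) := rfl
  constructor
  · intro h hnd
    rw [hlendef, hlen, List.dedup_eq_self.mpr hnd] at h
    exact lt_irrefl _ h
  · intro hnd
    have hsub := l.dedup_sublist
    have hle := hsub.length_le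
    have hne : l.dedup.length ≠ l.length := by
      intro he
      exact hnd (List.dedup_eq_self.mp (hsub.eq_of_length he))
    rw [hlendef, hlen]
    omega

lemma pvDupe_bridge (l : List Int) :
    decide (PySem.Set.len (PySem.Set.ofList l) < (l.length : Int)) = pvHasDupe l := by
  unfold pvHasDupe
  have hperm := PySem.List.sorted_perm l (fun x : Int => x) false
  have hpw := PySem.List.sorted_pairwise l (fun x : Int => x)
  have h1 := pvAdjAny_sorted _ hpw
  rw [hperm.nodup_iff] at h1
  by_cases hnd : l.Nodup
  · have hnl : ¬ (PySem.Set.len (PySem.Set.ofList l) < (l.length : Int)) :=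
      fun h => ((pvSetLen_lt_iff l).mp h) hnd
    simp only [hnl, decide_false]
    exact ((Bool.not_eq_true _).mp (fun h => (h1.mp h) hnd)).symm
  · have hl : PySem.Set.len (PySem.Set.ofList l) < (l.length : Int) :=
      (pvSetLen_lt_iff l).mpr hnd
    simp only [hl, decide_true]
    exact (h1.mpr hnd).symm

lemma pvDupe_bridge' (l : List Int) (N : Int) (h : (l.length : Int) = N) :
    decide (PySem.Set.len (PySem.Set.ofList l) < N) = pvHasDupe l := by
  subst h; exact pvDupe_bridge l

lemma pvLen_pyRange_map {α : Type} (m : Nat) (f : Int → α) :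
    (((PySem.List.pyRange 0 (m : Int) 1).map f).length : Int) = (m : Int) := by
  rw [PySem.List.pyRange_zero_natCast]
  simp

-- ===== VERDICT (by name: the statement is the Claim_ definition above) =====
theorem trace_and_dupes_spec : Claim_equal_trace_and_dupes := by
  intro mat _ hpre
  unfold Spec_trace_and_dupes
  rcases List.eq_nil_or_concat mat with hnil | ⟨_, _, hcons⟩
  · subst hnil; decide
  have hpos : (0 : Int) < (mat.length : Int) := by
    subst hcons; simp
  clear hcons
  simp only [trace_and_dupes, trace_and_dupes_alt, PySem.List.len_eq]
  rw [pvOuterA_eq]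
  simp only [PySem.List.len_eq]
  have hndr := PySem.List.nodup_pyRange_one 0 ((mat.length : Int))
  refine Prod.ext ?_ (Prod.ext ?_ ?_)
  -- trace
  · simp only [zero_add]
    congr 1
    apply List.map_congr_left
    intro i hi
    rw [pvFilter_beq_singleton _ hndr i hi]
    simp [pvEl, pvElB]
  -- rows
  · simp only [zero_add]
    congr 2
    apply List.filter_congr
    intro i _
    have hofl : ((PySem.List.pyRange 0 ((mat.length : Int)) 1).foldl
          (fun s j => s.add (pvEl mat i j)) PySem.Set.empty)
        = PySem.Set.ofList ((PySem.List.pyRange 0 ((mat.length : Int)) 1).map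
            (fun j => pvElB mat i j)) := by
      rw [PySem.Set.ofList_eq_foldl, List.foldl_map]; rfl
    simp only [hofl]
    exact pvDupe_bridge' _ _ (pvLen_pyRange_map mat.length _)
  -- cols
  · dsimp only
    have hne : PySem.List.pyRange 0 ((mat.length : Int)) 1 ≠ [] := by
      rw [PySem.List.pyRange_one_cons hpos]; simp
    obtain ⟨hk, hg⟩ := pvCols_final mat (PySem.List.pyRange 0 ((mat.length : Int)) 1) hndr
      (PySem.List.pyRange 0 ((mat.length : Int)) 1) hne
    rw [PySem.Dict.values_eq_map_keys _ (by rw [hk]; exact hndr) ([] : PySem.Set Int), hk]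
    rw [List.map_congr_left (fun j hj => by
      rw [hg j hj, PySem.Set.ofList_eq_foldl, List.foldl_map] :
      ∀ j ∈ PySem.List.pyRange 0 ((mat.length : Int)) 1, _ = PySem.Set.ofList
        ((PySem.List.pyRange 0 ((mat.length : Int)) 1).map (fun i => pvEl mat i j)))]
    refine (pvFoldl_count ((mat.length : Int)) _ 0).trans ?_
    rw [zero_add, List.filter_map, List.length_map]
    congr 2
    apply List.filter_congr
    intro j _
    simp only [Function.comp, pvEl, pvElB]
    exact pvDupe_bridge' _ _ (pvLen_pyRange_map mat.length _)
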